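-- pv_equiv track=rewrite | github.com/Jakub-Woszczek/Algorithms-and-Data-Structures-AGH-CS-Course- | Moje kolosy/Kolos 1 ASD/Template/kol1.py | maxrank
-- ===== SOURCE A (Python) =====
-- def maxrank(T):
--   n = len(T)
--   ranks_all = [0] * n
--   max_cnt = 0
--   for i in range(n - 1, 0, -1):
--     cnt = 0
--     if i <= max_cnt:
--       return max_cnt
--     for j in range(i - 1, -1, -1):
--       if T[j] < T[i]:
--         cnt += 1
--     ranks_all[i] = cnt
--     if cnt > max_cnt:
--       max_cnt = cnt
--
--   return max_cnt
--
--   return -1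
-- ===== SOURCE B (Python) =====
-- def maxrank(T):
--   # Forward pass: keep the already-seen elements in a sorted list; the
--   # binary-search insertion position of T[i] is exactly the number of
--   # earlier elements smaller than T[i]. Track the maximum position.
--   seen = []
--   best = 0
--   for x in T:
--     lo, hi = 0, len(seen)
--     while lo < hi:
--       mid = (lo + hi) // 2
--       if seen[mid] < x:
--         lo = mid + 1
--       else:
--         hi = mid
--     if lo > best:
--       best = lo
--     seen.insert(lo, x)
--   return best
-- ===== Notes on version B (the rewrite author's own statement) =====
-- stated objective: faster
-- what changed: A counts earlier-smaller elements with a backward nested scan per index (with an early return); B makes one forward pass keeping the already-seen elements in a sorted list, reading each element's rank off a hand-written binary search and tracking the running maximum.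
import Mathlib
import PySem

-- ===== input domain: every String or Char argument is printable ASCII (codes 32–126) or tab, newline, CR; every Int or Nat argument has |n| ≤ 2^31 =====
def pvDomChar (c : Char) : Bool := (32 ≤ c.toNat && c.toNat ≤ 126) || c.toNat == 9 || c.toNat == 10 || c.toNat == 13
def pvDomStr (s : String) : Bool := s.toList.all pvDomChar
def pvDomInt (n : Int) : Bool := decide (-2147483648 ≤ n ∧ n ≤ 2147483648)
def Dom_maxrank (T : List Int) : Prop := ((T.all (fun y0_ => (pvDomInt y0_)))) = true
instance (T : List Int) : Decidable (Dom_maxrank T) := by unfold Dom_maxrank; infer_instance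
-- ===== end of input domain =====

-- B replaces A's backward quadratic count-smaller scan by a forward pass that keeps the
-- already-seen elements in a sorted list and reads each rank off a binary search
-- (objective: faster; measured faster in a timing run).

-- ===== PORT A =====
-- inner loop: for j in range(i-1, -1, -1): if T[j] < T[i]: cnt += 1   (indices always in range)
def maxrankInner (T : List Int) (i : Int) : Int :=
  (PySem.List.pyRange (i - 1) (-1) (-1)).foldl
    (fun cnt j => if PySem.List.pyGetD T j 0 < PySem.List.pyGetD T i 0 then cnt + 1 else cnt) 0

-- outer loop over the descending range, carrying ranks_all, with the early `return max_cnt`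
def maxrankLoop (T : List Int) : List Int → List Int → Int → Int
  | [], _ranks, m => m
  | i :: rest, ranks, m =>
      if i ≤ m then m
      else
        maxrankLoop T rest (PySem.List.pySetD ranks i (maxrankInner T i))
          (if maxrankInner T i > m then maxrankInner T i else m)

def maxrank (T : List Int) : Int :=
  maxrankLoop T (PySem.List.pyRange ((T.length : Int) - 1) 0 (-1)) (List.replicate T.length 0) 0

-- ===== PORT B =====
-- while lo < hi: mid = (lo+hi)//2; if seen[mid] < x: lo = mid+1 else hi = mid   (mid always in range)
def bisectLoop (seen : List Int) (x : Int) (lo hi : Nat) : Nat :=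
  if _h : lo < hi then
    if seen.getD ((lo + hi) / 2) 0 < x then bisectLoop seen x ((lo + hi) / 2 + 1) hi
    else bisectLoop seen x lo ((lo + hi) / 2)
  else lo
termination_by hi - lo
decreasing_by all_goals omega

def maxrank_alt (T : List Int) : Int :=
  (T.foldl
    (fun (st : List Int × Int) x =>
      (PySem.List.insert st.1 ((bisectLoop st.1 x 0 st.1.length : Nat) : Int) x,
       if ((bisectLoop st.1 x 0 st.1.length : Nat) : Int) > st.2
       then ((bisectLoop st.1 x 0 st.1.length : Nat) : Int) else st.2))
    ([], 0)).2

-- ===== PRECONDITION & SPEC =====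
def Spec_maxrank (T : List Int) (out : Int) : Prop := out = maxrank_alt T
instance (T : List Int) (out : Int) : Decidable (Spec_maxrank T out) := by unfold Spec_maxrank; infer_instance

-- ===== CLAIM (what is proved, stated in full; the proofs are below) =====
def Claim_equal_maxrank : Prop := ∀ (T : List Int), Dom_maxrank T → Spec_maxrank T (maxrank T)

-- ===== LEMMAS AND PROOFS =====

-- rank of x relative to a list of earlier elements
def rk (pre : List Int) (x : Int) : Nat := pre.countP (fun y => decide (y < x))

-- common specification: forward max of ranks over growing prefixes
def specFold : List Int → List Int → Int → Int
  | [], _, b => b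
  | x :: rest, pre, b => specFold rest (pre ++ [x]) (max b (rk pre x : Int))

def rkAt (T : List Int) (i : Nat) : Nat := rk (T.take i) (T.getD i 0)

-- ---- generic max-fold facts ----
lemma foldl_max_out {α : Type} (l : List α) (f : α → Int) :
    ∀ (m a : Int), l.foldl (fun m j => max m (f j)) (max m a) = max (l.foldl (fun m j => max m (f j)) m) a := by
  induction l with
  | nil => intro m a; rfl
  | cons x xs ih =>
      intro m a
      simp only [List.foldl_cons]
      rw [max_right_comm, ih]

lemma foldl_max_const {α : Type} (l : List α) (f : α → Int) :
    ∀ (m : Int), (∀ j ∈ l, f j ≤ m) → l.foldl (fun m j => max m (f j)) m = m := by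
  induction l with
  | nil => intro m _; rfl
  | cons x xs ih =>
      intro m h
      simp only [List.foldl_cons]
      rw [max_eq_left (h x (by simp))]
      exact ih m (fun j hj => h j (by simp [hj]))

lemma ite_max (a b : Int) : (if a > b then a else b) = max b a := by
  rcases le_total a b with h | h
  · rw [max_eq_left h, if_neg (not_lt_of_ge h)]
  · rcases eq_or_lt_of_le h with rfl | h'
    · simp
    · rw [max_eq_right h, if_pos h']

lemma rkAt_le (T : List Int) (i : Nat) : (rkAt T i : Int) ≤ (i : Int) := by
  have h1 : rkAt T i ≤ (T.take i).length := List.countP_le_length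
  have h2 : (T.take i).length ≤ i := by simp
  exact_mod_cast le_trans h1 h2

-- ---- A side ----
lemma map_pyGetD_range_take (T : List Int) :
    ∀ (k : Nat), k ≤ T.length →
      (PySem.List.pyRange 0 (k : Int) 1).map (fun j => PySem.List.pyGetD T j 0) = T.take k := by
  intro k
  induction k with
  | zero => intro _; simp [PySem.List.pyRange_one_eq_nil]
  | succ k ih =>
      intro h
      have hcast : ((k + 1 : Nat) : Int) = (k : Int) + 1 := by push_cast; ring
      rw [hcast, PySem.List.pyRange_one_succ_right (by positivity), List.map_append, ih (by omega)]
      have hk : k < T.length := by omega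
      have hget : PySem.List.pyGetD T (k : Int) 0 = T[k] := by
        rw [PySem.List.pyGetD_natCast, List.getD_eq_getElem _ _ hk]
      rw [List.take_succ, List.getElem?_eq_getElem hk]
      simp [hget]

lemma inner_eq (T : List Int) (i : Nat) (hi : i < T.length) :
    maxrankInner T (i : Int) = (rkAt T i : Int) := by
  unfold maxrankInner
  rw [PySem.List.pyRange_neg_one_eq_reverse]
  have h1 : (-1 : Int) + 1 = 0 := by norm_num
  have h2 : (i : Int) - 1 + 1 = (i : Int) := by ring
  rw [h1, h2]
  have key : ∀ (l : List Int) (c : Int),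
      l.foldl (fun cnt j => if PySem.List.pyGetD T j 0 < PySem.List.pyGetD T (i : Int) 0 then cnt + 1 else cnt) c
        = c + ((l.map (fun j => PySem.List.pyGetD T j 0)).countP
            (fun y => decide (y < PySem.List.pyGetD T (i : Int) 0)) : Int) := by
    intro l
    induction l with
    | nil => intro c; simp
    | cons a l ih =>
        intro c
        simp only [List.foldl_cons, List.map_cons, List.countP_cons]
        rw [ih]
        push_cast
        simp only [decide_eq_true_eq]
        split_ifs with h <;> ring
  rw [key, List.map_reverse, List.countP_reverse, map_pyGetD_range_take T i (le_of_lt hi)]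
  have hx : PySem.List.pyGetD T (i : Int) 0 = T.getD i 0 := by
    rw [PySem.List.pyGetD_natCast]
  rw [hx]
  simp [rkAt, rk]

lemma loop_eq (T : List Int) :
    ∀ (k : Nat) (ranks : List Int) (m : Int), k < T.length → 0 ≤ m →
      maxrankLoop T (PySem.List.pyRange (k : Int) 0 (-1)) ranks m
        = (List.range' 1 k).foldl (fun m j => max m (rkAt T j : Int)) m := by
  intro k
  induction k with
  | zero => intro ranks m _ _; simp [PySem.List.pyRange_neg_one_eq_nil, maxrankLoop]
  | succ k ih =>
      intro ranks m hk hm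
      have hcast : ((k + 1 : Nat) : Int) = (k : Int) + 1 := by push_cast; ring
      rw [hcast, PySem.List.pyRange_neg_one_cons (by positivity)]
      have hsub : (k : Int) + 1 - 1 = (k : Int) := by ring
      rw [hsub]
      rw [List.range'_concat]
      rw [List.foldl_append]
      simp only [List.foldl_cons, List.foldl_nil]
      have hcnt : maxrankInner T ((k : Int) + 1) = (rkAt T (k + 1) : Int) := by
        rw [← hcast]; exact inner_eq T (k + 1) hk
      simp only [maxrankLoop, one_mul]
      rw [hcnt, ite_max]
      split_ifs with hle
      · -- early return: all remaining ranks are ≤ m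
        have hall : ∀ j ∈ List.range' 1 k, (rkAt T j : Int) ≤ m := by
          intro j hj
          have hjk : j ≤ k := by
            have := List.mem_range'.mp hj
            omega
          calc (rkAt T j : Int) ≤ (j : Int) := rkAt_le T j
            _ ≤ m := by
              have : (j : Int) ≤ (k : Int) + 1 := by exact_mod_cast Nat.le_succ_of_le hjk
              omega
        rw [foldl_max_const _ _ m hall]
        have h1k : (rkAt T (1 + k) : Int) ≤ m := by
          calc (rkAt T (1 + k) : Int) ≤ ((1 + k : Nat) : Int) := rkAt_le T (1 + k)
            _ ≤ m := by push_cast; omega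
        rw [max_eq_left h1k]
      · have hadd : 1 + k = k + 1 := by omega
        rw [ih _ _ (by omega) (le_trans hm (le_max_left _ _)), foldl_max_out, hadd]

lemma maxrank_eq_fold (T : List Int) :
    maxrank T = (List.range' 1 (T.length - 1)).foldl (fun m j => max m (rkAt T j : Int)) 0 := by
  unfold maxrank
  cases hn : T.length with
  | zero =>
      have he : PySem.List.pyRange (((0 : Nat) : Int) - 1) 0 (-1) = [] :=
        PySem.List.pyRange_neg_one_eq_nil (by norm_num)
      rw [he]
      simp [maxrankLoop]
  | succ n =>
      have hcast : (((n + 1 : Nat) : Int)) - 1 = (n : Int) := by push_cast; ring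
      rw [hcast, loop_eq T n _ 0 (by omega) le_rfl]
      simp

-- ---- bisect ----
lemma rk_split (seen : List Int) (x : Int) (lo : Nat) (hhl : lo ≤ seen.length)
    (hlow : ∀ i (h : i < seen.length), i < lo → seen[i] < x)
    (hhigh : ∀ i (h : i < seen.length), lo ≤ i → ¬ seen[i] < x) :
    rk seen x = lo := by
  have h1 : (seen.take lo).countP (fun y => decide (y < x)) = lo := by
    rw [List.countP_eq_length.mpr, List.length_take, min_eq_left hhl]
    intro a ha
    obtain ⟨i, hilt, hieq⟩ := List.mem_iff_getElem.mp ha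
    have hi2 : i < lo := by simpa using hilt.trans_le (by simp)
    have hgt : (seen.take lo)[i] = seen[i]'(by omega) := List.getElem_take
    rw [← hieq, hgt]
    exact decide_eq_true (hlow i (by omega) hi2)
  have h2 : (seen.drop lo).countP (fun y => decide (y < x)) = 0 := by
    rw [List.countP_eq_zero]
    intro a ha
    obtain ⟨i, hilt, hieq⟩ := List.mem_iff_getElem.mp ha
    have hgt : (seen.drop lo)[i] = seen[lo + i]'(by simp at hilt ⊢; omega) := List.getElem_drop
    rw [← hieq, hgt]
    simp only [decide_eq_true_eq]
    exact hhigh (lo + i) _ (by omega)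
  have h3 : rk (seen.take lo ++ seen.drop lo) x = lo := by
    unfold rk
    rw [List.countP_append, h1, h2]
    omega
  rwa [List.take_append_drop] at h3

lemma bisect_inv (seen : List Int) (x : Int) (hs : seen.Pairwise (· ≤ ·)) :
    ∀ (d lo hi : Nat), hi - lo ≤ d → lo ≤ hi → hi ≤ seen.length →
      (∀ i (h : i < seen.length), i < lo → seen[i] < x) →
      (∀ i (h : i < seen.length), hi ≤ i → ¬ seen[i] < x) →
      bisectLoop seen x lo hi = rk seen x := by
  intro d
  induction d with
  | zero =>
      intro lo hi hd hlh hhl hlow hhigh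
      have heq : lo = hi := by omega
      subst heq
      rw [bisectLoop, dif_neg (lt_irrefl lo)]
      exact (rk_split seen x lo hhl hlow hhigh).symm
  | succ d ih =>
      intro lo hi hd hlh hhl hlow hhigh
      rw [bisectLoop]
      split_ifs with h hmid
      · -- seen[mid] < x : lo := mid+1
        have hmlt : (lo + hi) / 2 < seen.length := by omega
        have hget : seen.getD ((lo + hi) / 2) 0 = seen[(lo + hi) / 2] :=
          List.getD_eq_getElem _ _ hmlt
        rw [hget] at hmid
        refine ih ((lo + hi) / 2 + 1) hi (by omega) (by omega) hhl ?_ hhigh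
        intro i hilen hilt
        rcases Nat.lt_or_ge i lo with hi2 | hi2
        · exact hlow i hilen hi2
        · rcases Nat.lt_or_ge i ((lo + hi) / 2) with hi3 | hi3
          · have hij := (List.pairwise_iff_getElem.mp hs) i ((lo + hi) / 2) hilen hmlt hi3
            exact lt_of_le_of_lt hij hmid
          · have heq : i = (lo + hi) / 2 := by omega
            subst heq
            exact hmid
      · -- ¬ seen[mid] < x : hi := mid
        have hmlt : (lo + hi) / 2 < seen.length := by omega
        have hget : seen.getD ((lo + hi) / 2) 0 = seen[(lo + hi) / 2] :=
          List.getD_eq_getElem _ _ hmlt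
        rw [hget] at hmid
        refine ih lo ((lo + hi) / 2) (by omega) (by omega) (by omega) hlow ?_
        intro i hilen hile hcon
        rcases Nat.lt_or_ge ((lo + hi) / 2) i with hi3 | hi3
        · have hij := (List.pairwise_iff_getElem.mp hs) ((lo + hi) / 2) i hmlt hilen hi3
          exact hmid (lt_of_le_of_lt hij hcon)
        · have heq : i = (lo + hi) / 2 := by omega
          subst heq
          exact hmid hcon
      · -- lo = hi
        have heq : lo = hi := by omega
        subst heq
        exact (rk_split seen x lo hhl hlow hhigh).symm

lemma bisect_eq (seen : List Int) (x : Int) (hs : seen.Pairwise (· ≤ ·)) :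
    bisectLoop seen x 0 seen.length = rk seen x := by
  refine bisect_inv seen x hs seen.length 0 seen.length le_rfl (Nat.zero_le _) le_rfl ?_ ?_
  · intro i _ h; omega
  · intro i h h'; omega

-- ---- sorted insertion ----
lemma sorted_split (seen : List Int) (x : Int) (hs : seen.Pairwise (· ≤ ·)) :
    (∀ a ∈ seen.take (rk seen x), a < x) ∧ (∀ b ∈ seen.drop (rk seen x), x ≤ b) := by
  induction seen with
  | nil => simp
  | cons y ys ih =>
      obtain ⟨hy, hys⟩ := List.pairwise_cons.mp hs
      by_cases hx : y < x
      · have hcnt : rk (y :: ys) x = rk ys x + 1 := by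
          unfold rk
          rw [List.countP_cons]
          simp [hx]
        obtain ⟨ih1, ih2⟩ := ih hys
        rw [hcnt]
        constructor
        · intro a ha
          rcases (by simpa using ha : a = y ∨ a ∈ ys.take (rk ys x)) with rfl | h
          · exact hx
          · exact ih1 a h
        · intro b hb
          exact ih2 b (by simpa using hb)
      · have hcnt : rk (y :: ys) x = 0 := by
          unfold rk
          rw [List.countP_cons, List.countP_eq_zero.mpr]
          · simp [hx]
          · intro z hz
            simp only [decide_eq_true_eq]
            have hz2 := hy z hz
            omega
        rw [hcnt]
        refine ⟨by simp, ?_⟩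
        intro b hb
        rcases (by simpa using hb : b = y ∨ b ∈ ys) with rfl | h
        · omega
        · have hb2 := hy b h
          omega

-- ---- B side ----
lemma alt_loop (rest : List Int) :
    ∀ (seen pre : List Int) (b : Int), seen.Perm pre → seen.Pairwise (· ≤ ·) →
    (rest.foldl
      (fun (st : List Int × Int) x =>
        (PySem.List.insert st.1 ((bisectLoop st.1 x 0 st.1.length : Nat) : Int) x,
         if ((bisectLoop st.1 x 0 st.1.length : Nat) : Int) > st.2
         then ((bisectLoop st.1 x 0 st.1.length : Nat) : Int) else st.2))
      (seen, b)).2 = specFold rest pre b := by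
  induction rest with
  | nil => intro seen pre b _ _; rfl
  | cons x rest ih =>
      intro seen pre b hperm hs
      simp only [List.foldl_cons, specFold]
      have hle : rk seen x ≤ seen.length := List.countP_le_length
      have hlo : bisectLoop seen x 0 seen.length = rk seen x := bisect_eq seen x hs
      have hrk : rk seen x = rk pre x := hperm.countP_eq _
      have hins : PySem.List.insert seen ((bisectLoop seen x 0 seen.length : Nat) : Int) x
          = seen.take (rk seen x) ++ x :: seen.drop (rk seen x) := by
        rw [hlo]
        exact PySem.List.insert_natCast seen (rk seen x) x hle
      obtain ⟨hlt, hge⟩ := sorted_split seen x hs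
      have hsorted : (seen.take (rk seen x) ++ x :: seen.drop (rk seen x)).Pairwise (· ≤ ·) := by
        rw [List.pairwise_append]
        refine ⟨hs.sublist (List.take_sublist _ _), ?_, ?_⟩
        · rw [List.pairwise_cons]
          exact ⟨hge, hs.sublist (List.drop_sublist _ _)⟩
        · intro a ha b hb
          rcases (by simpa using hb : b = x ∨ b ∈ seen.drop (rk seen x)) with rfl | h
          · exact le_of_lt (hlt a ha)
          · exact le_trans (le_of_lt (hlt a ha)) (hge b h)
      have hperm' : (seen.take (rk seen x) ++ x :: seen.drop (rk seen x)).Perm (pre ++ [x]) := by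
        have e1 : (seen.take (rk seen x) ++ x :: seen.drop (rk seen x)).Perm (x :: seen) := by
          have h := List.perm_middle (a := x) (l₁ := seen.take (rk seen x)) (l₂ := seen.drop (rk seen x))
          rwa [List.take_append_drop] at h
        exact e1.trans ((hperm.cons x).trans (List.perm_append_singleton x pre).symm)
      rw [hins]
      have hmax : (if ((bisectLoop seen x 0 seen.length : Nat) : Int) > b
            then ((bisectLoop seen x 0 seen.length : Nat) : Int) else b) = max b (rk pre x : Int) := by
        rw [hlo, hrk, ite_max]
      rw [hmax]
      exact ih _ _ _ hperm' hsorted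

lemma specFold_idx (T : List Int) :
    ∀ (rest : List Int) (k : Nat) (b : Int), rest = T.drop k →
      specFold rest (T.take k) b
        = (List.range' k rest.length).foldl (fun m j => max m (rkAt T j : Int)) b := by
  intro rest
  induction rest with
  | nil => intro k b _; rfl
  | cons x rest ih =>
      intro k b hrest
      have hk : k < T.length := by
        by_contra h
        rw [List.drop_eq_nil_of_le (by omega)] at hrest
        exact List.cons_ne_nil _ _ hrest
      have hx : T[k] = x := by
        have : (T.drop k)[0]'(by rw [← hrest]; simp) = x := by
          simp [← hrest]
        rwa [List.getElem_drop] at this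
      have htake : T.take (k + 1) = T.take k ++ [x] := by
        rw [List.take_succ]
        simp [List.getElem?_eq_getElem hk, hx]
      have hdrop : rest = T.drop (k + 1) := by
        have := congrArg List.tail hrest
        simpa [List.tail_drop] using this
      have hgetd : T.getD k 0 = x := by
        simp [List.getD_eq_getElem?_getD, List.getElem?_eq_getElem hk, hx]
      have hrk : rkAt T k = rk (T.take k) x := by rw [rkAt, hgetd]
      simp only [specFold, List.length_cons, List.range'_succ, List.foldl_cons]
      rw [hrk, ← htake]
      exact ih (k + 1) _ hdrop

-- final bridge between the two index ranges
lemma fold_ranges (T : List Int) :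
    (List.range' 0 T.length).foldl (fun m j => max m (rkAt T j : Int)) 0
      = (List.range' 1 (T.length - 1)).foldl (fun m j => max m (rkAt T j : Int)) 0 := by
  cases T with
  | nil => rfl
  | cons y ys =>
      rw [List.length_cons, List.range'_succ]
      simp only [List.foldl_cons]
      have h0 : rkAt (y :: ys) 0 = 0 := by simp [rkAt, rk]
      rw [h0]
      norm_num

-- ===== VERDICT (by name: the statement is the Claim_ definition above) =====
theorem maxrank_spec : Claim_equal_maxrank := by
  intro T _
  unfold Spec_maxrank
  rw [maxrank_eq_fold]
  unfold maxrank_alt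
  rw [alt_loop T [] [] 0 (List.Perm.refl _) (List.Pairwise.nil)]
  have := specFold_idx T T 0 0 (by simp)
  simp only [List.take_zero] at this
  rw [this, fold_ranges]
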